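-- pv_equiv track=rewrite | github.com/Serbirial/ai-framework | bot.py | parse_personality_data
-- ===== SOURCE A (Python) =====
-- def parse_personality_data(data_str):
--     """
--     Parses personality data string into dict of lists:
--     Example input:
--         traits: Curious, Playful; likes: cats, compliments; dislikes: dogs, rudeness; goals: Help users, Learn new things
--     Returns:
--         {
--           "traits": ["Curious", "Playful"],
--           "likes": ["cats", "compliments"],
--           "dislikes": ["dogs", "rudeness"],
--           "goals": ["Help users", "Learn new things"]
--         }
--     """
--     sections = ["traits", "likes", "dislikes", "goals"]
--     parsed = {sec: [] for sec in sections}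
--
--     # Split on semicolons or newlines
--     parts = [p.strip() for p in data_str.split(";") if p.strip()]
--
--     for part in parts:
--         # split into section_name and items by colon
--         if ":" in part:
--             sec_name, items_str = part.split(":", 1)
--             sec_name = sec_name.strip().lower()
--             if sec_name in sections:
--                 items = [item.strip() for item in items_str.split(",") if item.strip()]
--                 parsed[sec_name].extend(items)
--     return parsed
-- ===== SOURCE B (Python) =====
-- def parse_personality_data(data_str):
--     sections = ["traits", "likes", "dislikes", "goals"]
--     parts = [p.strip() for p in data_str.split(";") if p.strip()]
--
--     def collect(sec):
--         out = []
--         for part in parts: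
--             if ":" in part:
--                 name, items_str = part.split(":", 1)
--                 if name.strip().lower() == sec:
--                     out.extend(i.strip() for i in items_str.split(",") if i.strip())
--         return out
--
--     return {sec: collect(sec) for sec in sections}
-- ===== Notes on version B (the rewrite author's own statement) =====
-- stated objective: alternative
-- what changed: Inverts the loop nesting: instead of one dispatching pass that mutates a pre-initialised dict, B scans the parts once per section name and builds each section's list independently, assembling the dict by a per-section comprehension.
import Mathlib
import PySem

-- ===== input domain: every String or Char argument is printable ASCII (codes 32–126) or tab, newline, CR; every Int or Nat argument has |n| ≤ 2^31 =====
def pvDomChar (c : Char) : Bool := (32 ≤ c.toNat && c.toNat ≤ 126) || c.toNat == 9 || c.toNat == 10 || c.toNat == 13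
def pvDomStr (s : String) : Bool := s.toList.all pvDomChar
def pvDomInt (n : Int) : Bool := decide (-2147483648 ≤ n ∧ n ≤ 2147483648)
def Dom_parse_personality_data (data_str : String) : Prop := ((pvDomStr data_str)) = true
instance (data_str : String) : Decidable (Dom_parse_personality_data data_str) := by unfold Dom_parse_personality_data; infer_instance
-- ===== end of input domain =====

-- B inverts the loop nesting: one scan of the parts per section name instead of a single
-- dispatching pass over a pre-initialised dict (objective: alternative decomposition).

-- ===== PORT A =====
-- [p.strip() for p in s.split(sep) if p.strip()]
def pvParts (s : String) (sep : String) : List String :=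
  (((PySem.Str.split? s sep).getD []).map PySem.Str.strip).filter (fun p => p != "")

-- the body of A's `for part in parts` loop
def pvStepA (d : PySem.Dict String (List String)) (part : String) :
    PySem.Dict String (List String) :=
  if PySem.Str.isIn ":" part then
    match PySem.Str.splitMax? part ":" 1 with
    | some [sec_name, items_str] =>
      let sec_name := PySem.Str.lower (PySem.Str.strip sec_name)
      if sec_name ∈ ["traits", "likes", "dislikes", "goals"] then
        d.modify sec_name ([] : List String)
          (fun l => l ++ pvParts items_str ",")
      else d
    | _ => d
  else d

def parse_personality_data (data_str : String) : List (String × List String) :=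
  let sections : List String := ["traits", "likes", "dislikes", "goals"]
  let parsed : PySem.Dict String (List String) :=
    sections.foldl (fun d sec => d.insert sec ([] : List String)) PySem.Dict.empty
  let parts := pvParts data_str ";"
  (parts.foldl pvStepA parsed).items

-- ===== PORT B =====
-- the body of B's inner `for part in parts` loop in collect(sec)
def pvStepB (sec : String) (out : List String) (part : String) : List String :=
  if PySem.Str.isIn ":" part then
    match PySem.Str.splitMax? part ":" 1 with
    | some [name, items_str] =>
      if PySem.Str.lower (PySem.Str.strip name) == sec then
        out ++ pvParts items_str ","
      else out
    | _ => out
  else out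

def pvCollect (parts : List String) (sec : String) : List String :=
  parts.foldl (pvStepB sec) []

def parse_personality_data_alt (data_str : String) : List (String × List String) :=
  let sections : List String := ["traits", "likes", "dislikes", "goals"]
  let parts := pvParts data_str ";"
  (sections.foldl (fun d sec => d.insert sec (pvCollect parts sec))
      (PySem.Dict.empty : PySem.Dict String (List String))).items

-- ===== PRECONDITION & SPEC =====
def Spec_parse_personality_data (data_str : String) (out : List (String × List String)) : Prop := out = parse_personality_data_alt data_str
instance (data_str : String) (out : List (String × List String)) : Decidable (Spec_parse_personality_data data_str out) := by unfold Spec_parse_personality_data; infer_instance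

-- ===== CLAIM (what is proved, stated in full; the proofs are below) =====
def Claim_equal_parse_personality_data : Prop := ∀ (data_str : String), Dom_parse_personality_data data_str → Spec_parse_personality_data data_str (parse_personality_data data_str)

-- ===== LEMMAS AND PROOFS =====

-- the contribution of one part to section `sec`
def pvE (sec : String) (part : String) : List String :=
  if PySem.Str.isIn ":" part then
    match PySem.Str.splitMax? part ":" 1 with
    | some [name, items_str] =>
      if PySem.Str.lower (PySem.Str.strip name) == sec then pvParts items_str "," else []
    | _ => []
  else []

theorem pvCollect_flatMap (parts : List String) (sec : String) :
    pvCollect parts sec = parts.flatMap (pvE sec) := by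
  suffices h : ∀ acc, parts.foldl (pvStepB sec) acc = acc ++ parts.flatMap (pvE sec) by
    simpa using h []
  induction parts with
  | nil => simp
  | cons p ps ih =>
    intro acc
    simp only [List.foldl_cons, List.flatMap_cons, ih, pvStepB, pvE]
    split_ifs with h
    · rcases hs : PySem.Str.splitMax? p ":" 1 with _ | l
      · simp
      · match l with
        | [] => simp
        | [a] => simp
        | a :: b :: c :: r => simp
        | [a, b] =>
          by_cases h2 : (PySem.Str.lower (PySem.Str.strip a) == sec) = true <;> simp [h2]
    · simp

theorem pvFoldA (parts : List String) (vt vl vd vg : List String) :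
    parts.foldl pvStepA
        (PySem.Dict.mk [("traits", vt), ("likes", vl), ("dislikes", vd), ("goals", vg)])
      = PySem.Dict.mk
          [("traits", vt ++ parts.flatMap (pvE "traits")),
           ("likes", vl ++ parts.flatMap (pvE "likes")),
           ("dislikes", vd ++ parts.flatMap (pvE "dislikes")),
           ("goals", vg ++ parts.flatMap (pvE "goals"))] := by
  induction parts generalizing vt vl vd vg with
  | nil => simp
  | cons p ps ih =>
    simp only [List.foldl_cons, List.flatMap_cons]
    rw [show pvStepA (PySem.Dict.mk [("traits", vt), ("likes", vl), ("dislikes", vd), ("goals", vg)]) p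
        = PySem.Dict.mk [("traits", vt ++ pvE "traits" p), ("likes", vl ++ pvE "likes" p),
            ("dislikes", vd ++ pvE "dislikes" p), ("goals", vg ++ pvE "goals" p)] from ?_,
      ih]
    · simp [List.append_assoc]
    · simp only [pvStepA, pvE]
      split_ifs with h
      · rcases hs : PySem.Str.splitMax? p ":" 1 with _ | l
        · simp
        · match l with
          | [] => simp
          | [a] => simp
          | a :: b :: c :: r => simp
          | [a, b] =>
            by_cases hm : PySem.Str.lower (PySem.Str.strip a) ∈
                (["traits", "likes", "dislikes", "goals"] : List String)
            · simp only [List.mem_cons, List.not_mem_nil, or_false] at hm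
              rcases hm with hm | hm | hm | hm <;>
                simp [hm, PySem.Dict.modify, PySem.Dict.insert, PySem.Dict.getD, PySem.Dict.get?, PySem.Dict.contains]
            · have h1 : (PySem.Str.lower (PySem.Str.strip a) == "traits") = false := by
                simp_all
              have h2 : (PySem.Str.lower (PySem.Str.strip a) == "likes") = false := by
                simp_all
              have h3 : (PySem.Str.lower (PySem.Str.strip a) == "dislikes") = false := by
                simp_all
              have h4 : (PySem.Str.lower (PySem.Str.strip a) == "goals") = false := by
                simp_all
              simp [hm, h1, h2, h3, h4]
      · simp

-- ===== VERDICT (by name: the statement is the Claim_ definition above) =====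
theorem parse_personality_data_spec : Claim_equal_parse_personality_data := by
  intro data_str _
  unfold Spec_parse_personality_data parse_personality_data parse_personality_data_alt
  have hinit : (["traits", "likes", "dislikes", "goals"] : List String).foldl
      (fun d sec => d.insert sec ([] : List String)) PySem.Dict.empty
      = PySem.Dict.mk [("traits", []), ("likes", []), ("dislikes", []), ("goals", [])] := by
    decide
  simp only [hinit, pvFoldA, List.nil_append]
  rw [PySem.Dict.items_foldl_insert_fresh]
  · simp [pvCollect_flatMap, PySem.Dict.empty]
  · intro a ha; simp [PySem.Dict.contains_empty]
  · decide
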